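-- pv_equiv track=rewrite | github.com/miguelLopezUlloa/Python-course | homework/EpamModulo61.py | my_generator
-- ===== SOURCE A (Python) =====
-- def my_generator(num):
--     if num < 0:
--         rngFin = abs(num)
--     else:
--         rngFin = num
--
--     #Range from num to totRange
--     totRange = (rngFin + rngFin)+ 1
--
--     for i in range(rngFin, totRange):
--         if num % 2 == 0:
--             yield num
--             num += 2
--         else:
--             yield num
--             num += 1
-- ===== SOURCE B (Python) =====
-- def my_generator(num):
--     count = abs(num) + 1
--     if num % 2 == 0:
--         for i in range(count):
--             yield num + 2 * i
--     else:
--         yield num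
--         for i in range(1, count):
--             yield num - 1 + 2 * i
-- ===== Notes on version B (the rewrite author's own statement) =====
-- stated objective: simpler
-- what changed: B computes the count once, hoists the parity test out of the loop, and yields each value by a closed-form index (num+2*i / num-1+2*i) instead of re-testing parity and mutating an accumulator every iteration.
import Mathlib
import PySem

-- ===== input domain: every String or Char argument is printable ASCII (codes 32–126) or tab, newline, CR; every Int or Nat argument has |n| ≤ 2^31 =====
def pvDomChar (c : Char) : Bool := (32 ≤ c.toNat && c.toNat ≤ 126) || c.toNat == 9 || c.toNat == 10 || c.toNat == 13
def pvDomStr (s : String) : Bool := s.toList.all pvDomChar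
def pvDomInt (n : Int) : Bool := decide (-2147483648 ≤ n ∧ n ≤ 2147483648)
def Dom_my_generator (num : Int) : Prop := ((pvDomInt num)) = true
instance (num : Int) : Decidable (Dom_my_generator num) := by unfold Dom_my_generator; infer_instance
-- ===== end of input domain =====

-- B hoists the parity test out of the loop and yields by closed-form index instead of
-- re-testing parity on a mutated accumulator each iteration (objective: simpler).

-- ===== PORT A =====
-- literal transliteration: loop over range(rngFin, totRange), state = (num, yielded list)
def my_generator (num : Int) : List Int :=
  let rngFin : Int := if num < 0 then |num| else num
  let totRange : Int := (rngFin + rngFin) + 1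
  ((PySem.List.pyRange rngFin totRange 1).foldl
    (fun (st : Int × List Int) _ =>
      if PySem.Int.mod st.1 2 = 0 then (st.1 + 2, st.2 ++ [st.1])
      else (st.1 + 1, st.2 ++ [st.1]))
    (num, [])).2

-- ===== PORT B =====
def my_generator_alt (num : Int) : List Int :=
  let count : Int := |num| + 1
  if PySem.Int.mod num 2 = 0 then
    (PySem.List.pyRange 0 count 1).map (fun i => num + 2 * i)
  else
    num :: (PySem.List.pyRange 1 count 1).map (fun i => num - 1 + 2 * i)

-- ===== PRECONDITION & SPEC =====
def Spec_my_generator (num : Int) (out : List Int) : Prop := out = my_generator_alt num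
instance (num : Int) (out : List Int) : Decidable (Spec_my_generator num out) := by unfold Spec_my_generator; infer_instance

-- ===== CLAIM (what is proved, stated in full; the proofs are below) =====
def Claim_equal_my_generator : Prop := ∀ (num : Int), Dom_my_generator num → Spec_my_generator num (my_generator num)

-- ===== LEMMAS AND PROOFS =====

-- the loop body of port A, named for the lemmas
def pvStepA (st : Int × List Int) (_ : Int) : Int × List Int :=
  if PySem.Int.mod st.1 2 = 0 then (st.1 + 2, st.2 ++ [st.1])
  else (st.1 + 1, st.2 ++ [st.1])

theorem mod_two_add_two (n : Int) (h : PySem.Int.mod n 2 = 0) :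
    PySem.Int.mod (n + 2) 2 = 0 := by
  rw [PySem.Int.mod_eq_emod_of_pos (a := n) (by norm_num)] at h
  rw [PySem.Int.mod_eq_emod_of_pos (a := n + 2) (by norm_num)]
  omega

theorem foldA_even (l : List Int) (n : Int) (acc : List Int)
    (h : PySem.Int.mod n 2 = 0) :
    (l.foldl pvStepA (n, acc)).2
      = acc ++ (List.range l.length).map (fun (k : Nat) => n + 2 * (k : Int)) := by
  induction l generalizing n acc with
  | nil => simp
  | cons x l ih =>
    simp only [List.foldl_cons, pvStepA, h, if_pos, List.length_cons]
    rw [ih (n + 2) (acc ++ [n]) (mod_two_add_two n h)]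
    rw [List.range_succ_eq_map]
    simp only [List.map_cons, List.map_map, List.append_assoc, List.singleton_append,
      Nat.cast_zero, mul_zero, add_zero]
    congr 1
    simp only [List.cons.injEq, true_and]
    apply List.map_congr_left
    intro k _
    simp only [Function.comp_apply, Nat.succ_eq_add_one]
    push_cast
    ring

theorem foldA_odd (x : Int) (l : List Int) (n : Int) (acc : List Int)
    (h : ¬ PySem.Int.mod n 2 = 0) :
    ((x :: l).foldl pvStepA (n, acc)).2
      = acc ++ n :: (List.range l.length).map (fun (k : Nat) => n + 1 + 2 * (k : Int)) := by
  simp only [List.foldl_cons, pvStepA, h, if_false]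
  have he : PySem.Int.mod (n + 1) 2 = 0 := by
    rw [PySem.Int.mod_eq_emod_of_pos (a := n) (by norm_num)] at h
    rw [PySem.Int.mod_eq_emod_of_pos (a := n + 1) (by norm_num)]
    omega
  rw [foldA_even l (n + 1) (acc ++ [n]) he]
  simp

-- ===== VERDICT (by name: the statement is the Claim_ definition above) =====
theorem my_generator_spec : Claim_equal_my_generator := by
  intro num _
  unfold Spec_my_generator my_generator my_generator_alt
  have h0 : 0 ≤ |num| := abs_nonneg num
  have habs : (if num < 0 then |num| else num) = |num| := by
    split
    · rfl
    · exact (abs_of_nonneg (by omega)).symm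
  simp only [habs]
  have hlen : (PySem.List.pyRange |num| (|num| + |num| + 1) 1).length = (|num| + 1).toNat := by
    rw [PySem.List.length_pyRange_one]
    congr 1
    omega
  by_cases h : PySem.Int.mod num 2 = 0
  · rw [if_pos h]
    show (List.foldl pvStepA (num, []) _).2 = _
    rw [foldA_even _ _ _ h, hlen]
    rw [PySem.List.pyRange_one]
    simp only [List.map_map, List.nil_append, sub_zero]
    apply List.map_congr_left
    intro k _
    simp only [Function.comp_apply]
    ring
  · rw [if_neg h]
    have hlt : |num| < |num| + |num| + 1 := by omega
    rw [PySem.List.pyRange_one_cons hlt]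
    show (List.foldl pvStepA (num, []) _).2 = _
    rw [foldA_odd _ _ _ _ h]
    have hlen2 : (PySem.List.pyRange (|num| + 1) (|num| + |num| + 1) 1).length
        = (|num|).toNat := by
      rw [PySem.List.length_pyRange_one]
      congr 1
      omega
    rw [hlen2, PySem.List.pyRange_one]
    have he : |num| + 1 - 1 = |num| := by ring
    rw [he]
    simp only [List.map_map, List.nil_append, List.cons.injEq, true_and]
    apply List.map_congr_left
    intro k _
    simp only [Function.comp_apply]
    ring
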